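-- pv_equiv track=rewrite | github.com/5minho/Codility | lesson_10/Flags.py | get_next_peaks
-- ===== SOURCE A (Python) =====
-- def get_next_peaks(peaks):
--     n = len(peaks)
--     next_peak = [-1] * n
--     for i in range(n - 2, -1, -1):
--         if peaks[i]:
--             next_peak[i] = i
--         else:
--             next_peak[i] = next_peak[i + 1]
--     return next_peak
-- ===== SOURCE B (Python) =====
-- def get_next_peaks(peaks):
--     # forward two-pointer sweep over a prebuilt index of peak positions
--     peak_idx = [j for j, v in enumerate(peaks[:-1]) if v]
--     next_peak = []
--     p = 0
--     for i in range(len(peaks)):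
--         while p < len(peak_idx) and peak_idx[p] < i:
--             p += 1
--         next_peak.append(peak_idx[p] if p < len(peak_idx) else -1)
--     return next_peak
-- ===== Notes on version B (the rewrite author's own statement) =====
-- stated objective: alternative
-- what changed: Replaces A's backward dynamic-programming scan (next_peak[i] filled from next_peak[i+1]) with first building the list of peak positions (excluding the last index) and then a forward two-pointer sweep that assigns each position the first not-yet-passed peak index.
import Mathlib
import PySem

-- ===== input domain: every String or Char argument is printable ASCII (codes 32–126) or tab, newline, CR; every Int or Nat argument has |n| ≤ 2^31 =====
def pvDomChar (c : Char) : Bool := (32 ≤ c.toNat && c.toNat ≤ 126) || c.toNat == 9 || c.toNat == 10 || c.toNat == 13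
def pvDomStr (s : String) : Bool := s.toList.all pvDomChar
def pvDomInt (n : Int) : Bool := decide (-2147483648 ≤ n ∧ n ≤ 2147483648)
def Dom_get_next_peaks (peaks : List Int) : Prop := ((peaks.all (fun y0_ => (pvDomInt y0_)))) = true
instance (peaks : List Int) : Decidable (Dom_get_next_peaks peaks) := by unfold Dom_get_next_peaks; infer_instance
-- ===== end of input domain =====

-- B replaces A's backward dynamic-programming scan by building the list of peak positions
-- (excluding the last index, as in A) and a forward two-pointer sweep; objective: alternative
-- decomposition, same linear cost.

-- ===== PORT A =====
-- A's backward loop (next_peak[i] from next_peak[i+1]) rendered as the obvious recursion from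
-- the right: the tail of the result is the already-filled suffix, its head is next_peak[i+1].
def pvAuxA (i : Int) : List Int → List Int
  | [] => []
  | [_] => [-1]                      -- next_peak[n-1] is never written: stays -1
  | x :: y :: rest =>
      let r := pvAuxA (i + 1) (y :: rest)
      (if x ≠ 0 then i else r.headD (-1)) :: r

def get_next_peaks (peaks : List Int) : List Int := pvAuxA 0 peaks

-- ===== PORT B =====
-- peak_idx = [j for j, v in enumerate(peaks[:-1]) if v]
-- the for-i loop with pointer p: consumed prefix of peak_idx = pointer; fuel k = remaining i's.
def pvSweepB : List Int → Nat → Int → List Int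
  | _, 0, _ => []
  | idxs, Nat.succ k, i =>
      match idxs with
      | [] => (-1) :: pvSweepB [] k (i + 1)
      | j :: rest =>
          if j < i then pvSweepB rest (Nat.succ k) i          -- while: advance the pointer
          else j :: pvSweepB (j :: rest) k (i + 1)
  termination_by idxs k _ => (k, idxs.length)

def get_next_peaks_alt (peaks : List Int) : List Int :=
  let peak_idx := ((PySem.List.enumerate (PySem.List.slice peaks none (some (-1))) 0).filter
      (fun p => p.2 != 0)).map Prod.fst
  pvSweepB peak_idx peaks.length 0

-- ===== PRECONDITION & SPEC =====
def Spec_get_next_peaks (peaks : List Int) (out : List Int) : Prop := out = get_next_peaks_alt peaks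
instance (peaks : List Int) (out : List Int) : Decidable (Spec_get_next_peaks peaks out) := by unfold Spec_get_next_peaks; infer_instance

-- ===== CLAIM (what is proved, stated in full; the proofs are below) =====
def Claim_equal_get_next_peaks : Prop := ∀ (peaks : List Int), Dom_get_next_peaks peaks → Spec_get_next_peaks peaks (get_next_peaks peaks)

-- ===== LEMMAS AND PROOFS =====

-- first peak index at-or-after i, ignoring the last element of the list
def pvGHead (i : Int) : List Int → Int
  | [] => -1
  | [_] => -1
  | x :: y :: rest => if x ≠ 0 then i else pvGHead (i + 1) (y :: rest)

-- the intended result, suffix by suffix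
def pvSpecList (i : Int) : List Int → List Int
  | [] => []
  | x :: rest => pvGHead i (x :: rest) :: pvSpecList (i + 1) rest

-- indices (offset by i) of the nonzero entries of a list (no last-element exclusion here;
-- it is applied to peaks.dropLast)
def pvPeakIdx (i : Int) : List Int → List Int
  | [] => []
  | x :: rest => if x ≠ 0 then i :: pvPeakIdx (i + 1) rest else pvPeakIdx (i + 1) rest

theorem pvAuxA_eq_spec (l : List Int) : ∀ i, pvAuxA i l = pvSpecList i l := by
  induction l with
  | nil => intro i; rfl
  | cons x t ih =>
    intro i
    match t with
    | [] => rfl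
    | y :: r =>
      simp only [pvAuxA, ih, pvSpecList, List.headD_cons, pvGHead]

theorem pvPeakIdx_ge (l : List Int) : ∀ i j, j ∈ pvPeakIdx i l → i ≤ j := by
  induction l with
  | nil => intro i j h; simp [pvPeakIdx] at h
  | cons x t ih =>
    intro i j h
    simp only [pvPeakIdx] at h
    split at h
    · rcases List.mem_cons.mp h with h | h
      · omega
      · have := ih (i + 1) j h; omega
    · have := ih (i + 1) j h; omega

-- head of the peak index list of the (already dropLast'ed) list
theorem pvPeakIdx_headD (l : List Int) : ∀ i,
    (pvPeakIdx i l).headD (-1) = pvGHead i (l ++ [0]) := by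
  induction l with
  | nil => intro i; rfl
  | cons x t ih =>
    intro i
    obtain ⟨z, w, hz⟩ : ∃ z w, t ++ [(0 : Int)] = z :: w := by
      cases t <;> exact ⟨_, _, rfl⟩
    simp only [pvPeakIdx, List.cons_append, hz, pvGHead]
    by_cases hx : x ≠ 0
    · simp [hx]
    · simp only [if_neg hx]
      rw [← hz]
      exact ih (i + 1)

theorem pvGHead_append_zero (l : List Int) : ∀ i, pvGHead i (l.dropLast ++ [0]) = pvGHead i l := by
  induction l with
  | nil => intro i; rfl
  | cons x t ih =>
    intro i
    cases t with
    | nil => rfl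
    | cons y r =>
      obtain ⟨z, w, hz⟩ : ∃ z w, (y :: r).dropLast ++ [(0 : Int)] = z :: w := by
        cases (y :: r).dropLast <;> exact ⟨_, _, rfl⟩
      have hd : (x :: y :: r).dropLast ++ [(0 : Int)] = x :: z :: w := by
        rw [List.dropLast_cons₂, List.cons_append, hz]
      rw [hd]
      simp only [pvGHead]
      by_cases hx : x ≠ 0
      · simp [hx]
      · simp only [if_neg hx]
        rw [← hz, ih]

-- the key simulation: the forward sweep over the peak index list of peaks.dropLast
-- produces the intended result
theorem pvSweep_eq_spec (l : List Int) : ∀ i,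
    pvSweepB (pvPeakIdx i l.dropLast) l.length i = pvSpecList i l := by
  induction l with
  | nil => intro i; simp [pvSweepB, pvPeakIdx, pvSpecList]
  | cons x t ih =>
    intro i
    cases t with
    | nil => simp [pvSweepB, pvPeakIdx, pvSpecList, pvGHead]
    | cons y r =>
      have hd : (x :: y :: r).dropLast = x :: (y :: r).dropLast := rfl
      have hg : pvGHead i (x :: y :: r) = if x ≠ 0 then i else pvGHead (i + 1) (y :: r) := rfl
      rw [hd]
      simp only [pvPeakIdx, List.length_cons]
      by_cases hx : x ≠ 0
      · simp only [if_pos hx]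
        have h1 : pvSweepB (i :: pvPeakIdx (i + 1) (y :: r).dropLast) (r.length + 1 + 1) i
            = i :: pvSweepB (i :: pvPeakIdx (i + 1) (y :: r).dropLast) (r.length + 1) (i + 1) := by
          simp [pvSweepB]
        have h2 : pvSweepB (i :: pvPeakIdx (i + 1) (y :: r).dropLast) (r.length + 1) (i + 1)
            = pvSweepB (pvPeakIdx (i + 1) (y :: r).dropLast) (r.length + 1) (i + 1) := by
          simp [pvSweepB]
        have h3 := ih (i + 1)
        simp only [List.length_cons] at h3
        rw [h1, h2, h3]
        simp [pvSpecList, hg, hx]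
      · simp only [if_neg hx]
        have hout : pvSweepB (pvPeakIdx (i + 1) (y :: r).dropLast) (r.length + 1 + 1) i
            = (pvPeakIdx (i + 1) (y :: r).dropLast).headD (-1)
              :: pvSweepB (pvPeakIdx (i + 1) (y :: r).dropLast) (r.length + 1) (i + 1) := by
          cases h : pvPeakIdx (i + 1) (y :: r).dropLast with
          | nil => simp [pvSweepB]
          | cons j rest =>
            have hj : i + 1 ≤ j := pvPeakIdx_ge _ _ j (h ▸ List.mem_cons_self ..)
            have hlt : ¬ j < i := by omega
            simp [pvSweepB, hlt]
        have h3 := ih (i + 1)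
        simp only [List.length_cons] at h3
        rw [hout, h3]
        simp only [pvSpecList, hg, if_neg hx]
        rw [pvPeakIdx_headD, pvGHead_append_zero]

-- B's comprehension builds exactly pvPeakIdx
theorem pvFilter_enumerate (l : List Int) : ∀ s,
    ((PySem.List.enumerate l s).filter (fun p => p.2 != 0)).map Prod.fst = pvPeakIdx s l := by
  induction l with
  | nil => intro s; simp [PySem.List.enumerate_nil, pvPeakIdx]
  | cons x t ih =>
    intro s
    rw [PySem.List.enumerate_cons]
    simp only [List.filter_cons, pvPeakIdx]
    by_cases hx : x ≠ 0
    · simp [hx, ih]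
    · simp at hx; simp [hx, ih]

-- ===== VERDICT (by name: the statement is the Claim_ definition above) =====
theorem get_next_peaks_spec : Claim_equal_get_next_peaks := by
  intro peaks _
  show get_next_peaks peaks = get_next_peaks_alt peaks
  unfold get_next_peaks get_next_peaks_alt
  rw [PySem.List.slice_to_neg_one, pvFilter_enumerate, pvSweep_eq_spec, pvAuxA_eq_spec]
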